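-- pv_equiv track=rewrite | github.com/arnabs542/scaler_academy | DSA_Problem_Solving/Dynamic_Programming/DP_2/repeated_subsequence.py | modified_lcs_tabular
-- ===== SOURCE A (Python) =====
-- def modified_lcs_tabular(st):
--
--     n = len(st)
--
--     dp = [[0 for i in range(n + 1)] for j in range(n + 1)]
--
--     dp[0][0] = 1
--
--     for i in range(1, n + 1):
--
--         for j in range(1, n + 1):
--
--             if st[i - 1] == st[j - 1] and i != j:
--
--                 dp[i][j] = 1 + dp[i - 1][j - 1]
--
--             else:
--                 dp[i][j] = max(dp[i - 1][j], dp[i][j - 1])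
--
--             if dp[i][j] >= 2:
--                 return 1
--
--     return 0
-- ===== SOURCE B (Python) =====
-- def modified_lcs_tabular(st):
--     n = len(st)
--     pairs = [(i, j) for i in range(n) for j in range(n) if i != j and st[i] == st[j]]
--     if any(i1 < i2 and j1 < j2 for (i1, j1) in pairs for (i2, j2) in pairs):
--         return 1
--     return 0
-- ===== Notes on version B (the rewrite author's own statement) =====
-- stated objective: alternative
-- what changed: B drops A's early-exit LCS(st,st) dynamic-programming table entirely and instead searches directly for two order-compatible pairs of equal characters at distinct indices, which is exactly when a repeated subsequence of length >= 2 exists.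
import Mathlib
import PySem

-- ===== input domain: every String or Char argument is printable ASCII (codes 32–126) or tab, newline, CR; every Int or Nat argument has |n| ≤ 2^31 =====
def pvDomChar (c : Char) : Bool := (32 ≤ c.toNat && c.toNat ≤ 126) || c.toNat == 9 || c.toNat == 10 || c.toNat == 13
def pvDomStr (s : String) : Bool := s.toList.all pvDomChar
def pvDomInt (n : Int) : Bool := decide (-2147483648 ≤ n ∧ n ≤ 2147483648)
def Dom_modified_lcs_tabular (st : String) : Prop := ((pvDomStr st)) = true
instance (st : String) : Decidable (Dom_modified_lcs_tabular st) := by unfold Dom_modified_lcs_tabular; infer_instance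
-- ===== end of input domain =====

-- B replaces A's early-exit LCS(st,st) DP table by a direct search for two
-- order-compatible equal-character index pairs (alternative algorithm; not faster).

-- ===== PORT A =====
-- dp is ported as a function Nat → Nat → Int (Python's list-of-lists of zeros, with
-- point updates dp[i][j] = v); the early `return 1` is the Except.error branch.
def pvSetF (dp : Nat → Nat → Int) (i j : Nat) (v : Int) : Nat → Nat → Int :=
  fun p q => if p = i ∧ q = j then v else dp p q

def pvStep (s : List Char) (i j : Nat) (dp : Nat → Nat → Int) : Int :=
  if s.getD (i-1) ' ' = s.getD (j-1) ' ' ∧ i ≠ j then 1 + dp (i-1) (j-1)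
  else max (dp (i-1) j) (dp i (j-1))

def pvInner (s : List Char) (i : Nat) (acc : Except Int (Nat → Nat → Int)) (j : Nat) :
    Except Int (Nat → Nat → Int) :=
  match acc with
  | .error v => .error v
  | .ok dp =>
    let v := pvStep s i j dp
    let dp' := pvSetF dp i j v
    if 2 ≤ v then .error 1 else .ok dp'

def pvOuter (s : List Char) (n : Nat) (acc : Except Int (Nat → Nat → Int)) (i : Nat) :
    Except Int (Nat → Nat → Int) :=
  match acc with
  | .error v => .error v
  | .ok dp => (List.range' 1 n).foldl (pvInner s i) (.ok dp)

def modified_lcs_tabular (st : String) : Int :=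
  let s := st.toList
  let n := s.length
  let dp0 : Nat → Nat → Int := fun _ _ => 0
  let dp1 := pvSetF dp0 0 0 1
  match (List.range' 1 n).foldl (pvOuter s n) (.ok dp1) with
  | .error v => v
  | .ok _ => 0

-- ===== PORT B =====
def modified_lcs_tabular_alt (st : String) : Int :=
  let s := st.toList
  let n := s.length
  let pairs := (List.range n).flatMap (fun i =>
    (List.range n).filterMap (fun j =>
      if i ≠ j ∧ s.getD i ' ' = s.getD j ' ' then some (i, j) else none))
  if pairs.any (fun p1 => pairs.any (fun p2 => p1.1 < p2.1 && p1.2 < p2.2)) then 1 else 0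

-- ===== PRECONDITION & SPEC =====
def Spec_modified_lcs_tabular (st : String) (out : Int) : Prop := out = modified_lcs_tabular_alt st
instance (st : String) (out : Int) : Decidable (Spec_modified_lcs_tabular st out) := by unfold Spec_modified_lcs_tabular; infer_instance

-- ===== CLAIM (what is proved, stated in full; the proofs are below) =====
def Claim_equal_modified_lcs_tabular : Prop := ∀ (st : String), Dom_modified_lcs_tabular st → Spec_modified_lcs_tabular st (modified_lcs_tabular st)

-- ===== LEMMAS AND PROOFS =====
-- pvT is the full (never-early-exited) DP table of A; HasRep characterises it:
-- some value ≥ 2 exists iff two compatible equal-character index pairs exist.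
def pvT (s : List Char) : Nat → Nat → Int
  | 0, _ => 0
  | _+1, 0 => 0
  | i+1, j+1 =>
    if s.getD i ' ' = s.getD j ' ' ∧ i + 1 ≠ j + 1 then 1 + pvT s i j
    else max (pvT s i (j+1)) (pvT s (i+1) j)
termination_by i j => i + j

def PairAt (s : List Char) (a b : Nat) : Prop := a ≠ b ∧ s.getD a ' ' = s.getD b ' '

def HasRep (s : List Char) : Prop :=
  ∃ a1 b1 a2 b2, a1 < a2 ∧ b1 < b2 ∧ a2 < s.length ∧ b2 < s.length ∧ PairAt s a1 b1 ∧ PairAt s a2 b2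

theorem pvT_zl (s : List Char) (j : Nat) : pvT s 0 j = 0 := by cases j <;> simp [pvT]
theorem pvT_zr (s : List Char) (i : Nat) : pvT s i 0 = 0 := by cases i <;> simp [pvT]

theorem pvT_nonneg (s : List Char) : ∀ m i j, i + j ≤ m → 0 ≤ pvT s i j := by
  intro m
  induction m with
  | zero =>
    intro i j h
    obtain ⟨rfl, rfl⟩ : i = 0 ∧ j = 0 := by omega
    simp [pvT]
  | succ m ih =>
    intro i j h
    match i, j with
    | 0, j => simp [pvT_zl]
    | i+1, 0 => simp [pvT_zr]
    | i+1, j+1 =>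
      rw [pvT]
      split
      · have := ih i j (by omega); omega
      · have h1 := ih i (j+1) (by omega)
        exact le_max_of_le_left h1

theorem pvT_le_left (s : List Char) : ∀ m i j, i + j ≤ m → pvT s i j ≤ (i : Int) := by
  intro m
  induction m with
  | zero =>
    intro i j h
    obtain ⟨rfl, rfl⟩ : i = 0 ∧ j = 0 := by omega
    simp [pvT]
  | succ m ih =>
    intro i j h
    match i, j with
    | 0, j => simp [pvT_zl]
    | i+1, 0 => simp [pvT_zr]; positivity
    | i+1, j+1 =>
      rw [pvT]
      split
      · have := ih i j (by omega); push_cast; omega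
      · have h1 := ih i (j+1) (by omega)
        have h2 := ih (i+1) j (by omega)
        rw [max_le_iff]
        constructor
        · refine le_trans h1 ?_; push_cast; omega
        · exact h2

theorem pvT_le_right (s : List Char) : ∀ m i j, i + j ≤ m → pvT s i j ≤ (j : Int) := by
  intro m
  induction m with
  | zero =>
    intro i j h
    obtain ⟨rfl, rfl⟩ : i = 0 ∧ j = 0 := by omega
    simp [pvT]
  | succ m ih =>
    intro i j h
    match i, j with
    | 0, j => simp [pvT_zl]
    | i+1, 0 => simp [pvT_zr]
    | i+1, j+1 =>
      rw [pvT]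
      split
      · have := ih i j (by omega); push_cast; omega
      · have h1 := ih i (j+1) (by omega)
        have h2 := ih (i+1) j (by omega)
        rw [max_le_iff]
        constructor
        · exact h1
        · refine le_trans h2 ?_; push_cast; omega

theorem pvT_steps (s : List Char) : ∀ m i j, i + j ≤ m →
    pvT s i j ≤ pvT s (i+1) j ∧ pvT s (i+1) j ≤ pvT s i j + 1 ∧
    pvT s i j ≤ pvT s i (j+1) ∧ pvT s i (j+1) ≤ pvT s i j + 1 := by
  intro m
  induction m with
  | zero =>
    intro i j h
    obtain ⟨rfl, rfl⟩ : i = 0 ∧ j = 0 := by omega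
    refine ⟨?_, ?_, ?_, ?_⟩ <;> simp [pvT_zl, pvT_zr]
  | succ m ih =>
    intro i j h
    match i, j with
    | 0, j =>
      have hn := pvT_nonneg s (1 + j) 1 j le_rfl
      have hl := pvT_le_left s (1 + j) 1 j le_rfl
      simp only [pvT_zl]
      refine ⟨hn, by simpa using hl, le_rfl, by simp⟩
    | i+1, 0 =>
      have hn := pvT_nonneg s (i + 2) (i+1) 1 (by omega)
      have hr := pvT_le_right s (i + 2) (i+1) 1 (by omega)
      simp only [pvT_zr]
      refine ⟨le_rfl, by simp, hn, by simpa using hr⟩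
    | i+1, j+1 =>
      have h00 := ih i j (by omega)
      have h10 := ih (i+1) j (by omega)
      have h01 := ih i (j+1) (by omega)
      refine ⟨?_, ?_, ?_, ?_⟩ <;>
        · simp only [pvT]
          split_ifs <;> (try simp only [le_max_iff, max_le_iff]) <;> omega

theorem pvT_mono (s : List Char) {i i' j j' : Nat} (hi : i ≤ i') (hj : j ≤ j') :
    pvT s i j ≤ pvT s i' j' := by
  have hL : ∀ a b c : Nat, a ≤ c → pvT s a b ≤ pvT s c b := by
    intro a b c hac
    induction c, hac using Nat.le_induction with
    | base => exact le_rfl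
    | succ c hac ih => exact le_trans ih (pvT_steps s (c + b) c b le_rfl).1
  have hR : ∀ a b d : Nat, b ≤ d → pvT s a b ≤ pvT s a d := by
    intro a b d hbd
    induction d, hbd using Nat.le_induction with
    | base => exact le_rfl
    | succ d hbd ih => exact le_trans ih (pvT_steps s (a + d) a d le_rfl).2.2.1
  exact le_trans (hL i j i' hi) (hR i' j j' hj)

theorem pvT_sound1 (s : List Char) : ∀ m i j, i + j ≤ m → 1 ≤ pvT s i j →
    ∃ a b, a < i ∧ b < j ∧ PairAt s a b := by
  intro m
  induction m with
  | zero =>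
    intro i j h hv
    obtain ⟨rfl, rfl⟩ : i = 0 ∧ j = 0 := by omega
    simp [pvT_zl] at hv
  | succ m ih =>
    intro i j h hv
    match i, j with
    | 0, j => simp [pvT_zl] at hv
    | i+1, 0 => simp [pvT_zr] at hv
    | i+1, j+1 =>
      rw [pvT] at hv
      split_ifs at hv with hc
      · exact ⟨i, j, by omega, by omega, by omega, hc.1⟩
      · rw [le_max_iff] at hv
        rcases hv with hv | hv
        · obtain ⟨a, b, ha, hb, hp⟩ := ih i (j+1) (by omega) hv
          exact ⟨a, b, by omega, hb, hp⟩
        · obtain ⟨a, b, ha, hb, hp⟩ := ih (i+1) j (by omega) hv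
          exact ⟨a, b, ha, by omega, hp⟩

theorem pvT_sound2 (s : List Char) : ∀ m i j, i + j ≤ m → 2 ≤ pvT s i j →
    ∃ a1 b1 a2 b2, a1 < a2 ∧ b1 < b2 ∧ a2 < i ∧ b2 < j ∧ PairAt s a1 b1 ∧ PairAt s a2 b2 := by
  intro m
  induction m with
  | zero =>
    intro i j h hv
    obtain ⟨rfl, rfl⟩ : i = 0 ∧ j = 0 := by omega
    simp [pvT_zl] at hv
  | succ m ih =>
    intro i j h hv
    match i, j with
    | 0, j => simp [pvT_zl] at hv
    | i+1, 0 => simp [pvT_zr] at hv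
    | i+1, j+1 =>
      rw [pvT] at hv
      split_ifs at hv with hc
      · have h1 : 1 ≤ pvT s i j := by omega
        obtain ⟨a, b, ha, hb, hp⟩ := pvT_sound1 s (i + j) i j le_rfl h1
        exact ⟨a, b, i, j, ha, hb, by omega, by omega, hp, by omega, hc.1⟩
      · rw [le_max_iff] at hv
        rcases hv with hv | hv
        · obtain ⟨a1, b1, a2, b2, h1, h2, h3, h4, h5, h6⟩ := ih i (j+1) (by omega) hv
          exact ⟨a1, b1, a2, b2, h1, h2, by omega, h4, h5, h6⟩
        · obtain ⟨a1, b1, a2, b2, h1, h2, h3, h4, h5, h6⟩ := ih (i+1) j (by omega) hv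
          exact ⟨a1, b1, a2, b2, h1, h2, h3, by omega, h5, h6⟩

theorem pvT_complete1 (s : List Char) {a b i j : Nat} (hp : PairAt s a b)
    (ha : a < i) (hb : b < j) : 1 ≤ pvT s i j := by
  have h1 : 1 ≤ pvT s (a+1) (b+1) := by
    rw [pvT, if_pos ⟨hp.2, by have := hp.1; omega⟩]
    have := pvT_nonneg s (a + b) a b le_rfl
    omega
  exact le_trans h1 (pvT_mono s (by omega) (by omega))

theorem pvT_complete2 (s : List Char) {a1 b1 a2 b2 : Nat} (hp1 : PairAt s a1 b1)
    (hp2 : PairAt s a2 b2) (ha : a1 < a2) (hb : b1 < b2) : 2 ≤ pvT s (a2+1) (b2+1) := by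
  rw [pvT, if_pos ⟨hp2.2, by have := hp2.1; omega⟩]
  have := pvT_complete1 s hp1 ha hb
  omega

def pvInv (s : List Char) (n i j : Nat) (dp : Nat → Nat → Int) : Prop :=
  ∀ p q, dp p q = if p = 0 ∧ q = 0 then 1
    else if 1 ≤ p ∧ p ≤ n ∧ 1 ≤ q ∧ q ≤ n ∧ (p < i ∨ (p = i ∧ q ≤ j)) then pvT s p q else 0

def pvSmall (s : List Char) (n i j : Nat) : Prop :=
  ∀ p q, 1 ≤ p → p ≤ n → 1 ≤ q → q ≤ n → (p < i ∨ (p = i ∧ q ≤ j)) → pvT s p q < 2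

def pvGood (s : List Char) (n i j : Nat) : Except Int (Nat → Nat → Int) → Prop
  | .error v => v = 1 ∧ ∃ p q, p ≤ n ∧ q ≤ n ∧ 2 ≤ pvT s p q
  | .ok dp => pvInv s n i j dp ∧ pvSmall s n i j

theorem pvInv_read {s : List Char} {n i j : Nat} {dp : Nat → Nat → Int}
    (h : pvInv s n i j dp) {p q : Nat} (hp : p ≤ n) (hq : q ≤ n)
    (hnz : ¬(p = 0 ∧ q = 0)) (hproc : p = 0 ∨ q = 0 ∨ p < i ∨ (p = i ∧ q ≤ j)) :
    dp p q = pvT s p q := by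
  rw [h p q, if_neg hnz]
  by_cases h2 : 1 ≤ p ∧ p ≤ n ∧ 1 ≤ q ∧ q ≤ n ∧ (p < i ∨ p = i ∧ q ≤ j)
  · rw [if_pos h2]
  · rw [if_neg h2]
    have hpq : p = 0 ∨ q = 0 := by omega
    rcases hpq with rfl | rfl
    · rw [pvT_zl]
    · rw [pvT_zr]

theorem pvStep_eq {s : List Char} {n i' j' : Nat} {dp : Nat → Nat → Int}
    (hi : i' + 1 ≤ n) (hj : j' + 1 ≤ n) (h : pvInv s n (i'+1) j' dp) :
    pvStep s (i'+1) (j'+1) dp = pvT s (i'+1) (j'+1) := by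
  unfold pvStep
  simp only [Nat.add_sub_cancel]
  rw [pvT]
  split_ifs with hc
  · rw [pvInv_read h (by omega) (by omega) (by omega) (by omega)]
  · rw [pvInv_read h (by omega) (by omega) (by omega) (by omega),
      pvInv_read h (by omega) (by omega) (by omega) (by omega)]

theorem pvInv_set {s : List Char} {n i' j' : Nat} {dp : Nat → Nat → Int}
    (h : pvInv s n (i'+1) j' dp) (hi : i' + 1 ≤ n) (hj : j' + 1 ≤ n) :
    pvInv s n (i'+1) (j'+1) (pvSetF dp (i'+1) (j'+1) (pvT s (i'+1) (j'+1))) := by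
  intro p q
  unfold pvSetF
  by_cases hpq : p = i' + 1 ∧ q = j' + 1
  · obtain ⟨rfl, rfl⟩ := hpq
    rw [if_pos ⟨rfl, rfl⟩, if_neg (by omega), if_pos (by omega)]
  · rw [if_neg hpq, h p q]
    split_ifs <;> first | rfl | omega

theorem pvSmall_set {s : List Char} {n i' j' : Nat}
    (h : pvSmall s n (i'+1) j') (hv : pvT s (i'+1) (j'+1) < 2) :
    pvSmall s n (i'+1) (j'+1) := by
  intro p q h1 h2 h3 h4 h5
  by_cases hpq : p = i' + 1 ∧ q = j' + 1
  · obtain ⟨rfl, rfl⟩ := hpq; exact hv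
  · exact h p q h1 h2 h3 h4 (by omega)

theorem pvInner_fold {s : List Char} {n i' : Nat} (hi : i' + 1 ≤ n) :
    ∀ (cnt j' : Nat) (st : Except Int (Nat → Nat → Int)), j' + cnt ≤ n →
      pvGood s n (i'+1) j' st →
      pvGood s n (i'+1) (j' + cnt) ((List.range' (j'+1) cnt).foldl (pvInner s (i'+1)) st) := by
  intro cnt
  induction cnt with
  | zero => intro j' st _ hg; simpa using hg
  | succ c ih =>
    intro j' st hle hg
    rw [List.range'_succ, List.foldl_cons]
    have h1 : pvGood s n (i'+1) (j'+1) (pvInner s (i'+1) st (j'+1)) := by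
      match st with
      | .error v => exact hg
      | .ok dp =>
        obtain ⟨hinv, hsm⟩ := hg
        unfold pvInner
        dsimp only
        have hstep := pvStep_eq hi (by omega) hinv
        rw [hstep]
        split_ifs with h2
        · exact ⟨rfl, i'+1, j'+1, hi, by omega, h2⟩
        · exact ⟨pvInv_set hinv hi (by omega), pvSmall_set hsm (by omega)⟩
    have h2 := ih (j'+1) _ (by omega) h1
    have he : j' + 1 + c = j' + (c + 1) := by omega
    rw [he] at h2
    exact h2

theorem pvGood_shift {s : List Char} {n i : Nat} {st : Except Int (Nat → Nat → Int)}
    (h : pvGood s n i n st) : pvGood s n (i+1) 0 st := by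
  match st with
  | .error v => exact h
  | .ok dp =>
    obtain ⟨hinv, hsm⟩ := h
    constructor
    · intro p q
      rw [hinv p q]
      split_ifs <;> first | rfl | omega
    · intro p q h1 h2 h3 h4 h5
      exact hsm p q h1 h2 h3 h4 (by omega)

theorem pvOuter_fold {s : List Char} {n : Nat} :
    ∀ (cnt i' : Nat) (st : Except Int (Nat → Nat → Int)), i' + cnt ≤ n →
      pvGood s n (i'+1) 0 st →
      pvGood s n (i'+1+cnt) 0 ((List.range' (i'+1) cnt).foldl (pvOuter s n) st) := by
  intro cnt
  induction cnt with
  | zero => intro i' st _ hg; simpa using hg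
  | succ c ih =>
    intro i' st hle hg
    rw [List.range'_succ, List.foldl_cons]
    have h1 : pvGood s n (i'+2) 0 (pvOuter s n st (i'+1)) := by
      match st with
      | .error v => exact hg
      | .ok dp =>
        unfold pvOuter
        have := pvInner_fold (s := s) (n := n) (i' := i') (by omega) n 0 (.ok dp) (by omega) hg
        rw [Nat.zero_add] at this
        exact pvGood_shift this
    have h2 := ih (i'+1) _ (by omega) h1
    have he : i' + 1 + 1 + c = i' + 1 + (c + 1) := by omega
    rw [he] at h2
    exact h2

theorem pvGood_init (s : List Char) :
    pvGood s s.length 1 0 (.ok (pvSetF (fun _ _ => 0) 0 0 1)) := by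
  constructor
  · intro p q
    unfold pvSetF
    split_ifs <;> first | rfl | omega
  · intro p q h1 _ h3 _ h5
    exact absurd h5 (by omega)

theorem pvGood_final (st : String) :
    pvGood st.toList st.toList.length (st.toList.length + 1) 0
      ((List.range' 1 st.toList.length).foldl (pvOuter st.toList st.toList.length)
        (.ok (pvSetF (fun _ _ => 0) 0 0 1))) := by
  have h := pvOuter_fold (s := st.toList) (n := st.toList.length) st.toList.length 0
    (.ok (pvSetF (fun _ _ => 0) 0 0 1)) (by omega) (pvGood_init st.toList)
  simpa [Nat.add_comm] using h

theorem portA_one {st : String} (h : HasRep st.toList) : modified_lcs_tabular st = 1 := by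
  have hfold := pvGood_final st
  unfold modified_lcs_tabular
  dsimp only
  rcases hres : (List.range' 1 st.toList.length).foldl (pvOuter st.toList st.toList.length)
      (.ok (pvSetF (fun _ _ => 0) 0 0 1)) with v | dp
  · rw [hres] at hfold
    exact hfold.1
  · rw [hres] at hfold
    obtain ⟨a1, b1, a2, b2, h1, h2, h3, h4, h5, h6⟩ := h
    have hT := pvT_complete2 st.toList h5 h6 h1 h2
    have hsm := hfold.2 (a2+1) (b2+1) (by omega) (by omega) (by omega) (by omega) (by omega)
    omega

theorem portA_zero {st : String} (h : ¬ HasRep st.toList) : modified_lcs_tabular st = 0 := by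
  have hfold := pvGood_final st
  unfold modified_lcs_tabular
  dsimp only
  rcases hres : (List.range' 1 st.toList.length).foldl (pvOuter st.toList st.toList.length)
      (.ok (pvSetF (fun _ _ => 0) 0 0 1)) with v | dp
  · rw [hres] at hfold
    obtain ⟨p, q, hp, hq, hT⟩ := hfold.2
    obtain ⟨a1, b1, a2, b2, h1, h2, h3, h4, h5, h6⟩ := pvT_sound2 st.toList (p+q) p q le_rfl hT
    exact absurd ⟨a1, b1, a2, b2, h1, h2, by omega, by omega, h5, h6⟩ h
  · rfl

theorem pvPairs_mem (s : List Char) (x : Nat × Nat) :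
    x ∈ (List.range s.length).flatMap (fun i => (List.range s.length).filterMap (fun j =>
      if i ≠ j ∧ s.getD i ' ' = s.getD j ' ' then some (i, j) else none)) ↔
    (x.1 < s.length ∧ x.2 < s.length ∧ PairAt s x.1 x.2) := by
  obtain ⟨a, b⟩ := x
  simp only [List.mem_flatMap, List.mem_filterMap, List.mem_range, PairAt,
    Option.ite_none_right_eq_some, Option.some.injEq, Prod.mk.injEq]
  constructor
  · rintro ⟨i, hi, j, hj, ⟨hne, hc⟩, rfl, rfl⟩
    exact ⟨hi, hj, hne, hc⟩
  · rintro ⟨ha, hb, hne, hc⟩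
    exact ⟨a, ha, b, hb, ⟨hne, hc⟩, rfl, rfl⟩

theorem pvB_cond (st : String) :
    (((List.range st.toList.length).flatMap (fun i => (List.range st.toList.length).filterMap (fun j =>
        if i ≠ j ∧ st.toList.getD i ' ' = st.toList.getD j ' ' then some (i, j) else none))).any
      (fun p1 => ((List.range st.toList.length).flatMap (fun i => (List.range st.toList.length).filterMap (fun j =>
        if i ≠ j ∧ st.toList.getD i ' ' = st.toList.getD j ' ' then some (i, j) else none))).any
      (fun p2 => p1.1 < p2.1 && p1.2 < p2.2)) = true) ↔ HasRep st.toList := by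
  rw [List.any_eq_true]
  constructor
  · rintro ⟨⟨a1, b1⟩, hm1, hin⟩
    rw [List.any_eq_true] at hin
    obtain ⟨⟨a2, b2⟩, hm2, hlt⟩ := hin
    rw [pvPairs_mem] at hm1 hm2
    simp only [Bool.and_eq_true, decide_eq_true_eq] at hlt
    exact ⟨a1, b1, a2, b2, hlt.1, hlt.2, hm2.1, hm2.2.1, hm1.2.2, hm2.2.2⟩
  · rintro ⟨a1, b1, a2, b2, h1, h2, h3, h4, h5, h6⟩
    refine ⟨(a1, b1), (pvPairs_mem _ _).mpr ⟨by omega, by omega, h5⟩, ?_⟩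
    rw [List.any_eq_true]
    refine ⟨(a2, b2), (pvPairs_mem _ _).mpr ⟨h3, h4, h6⟩, ?_⟩
    simp only [Bool.and_eq_true, decide_eq_true_eq]
    exact ⟨h1, h2⟩

theorem portB_one {st : String} (h : HasRep st.toList) : modified_lcs_tabular_alt st = 1 := by
  unfold modified_lcs_tabular_alt
  dsimp only
  rw [if_pos ((pvB_cond st).mpr h)]

theorem portB_zero {st : String} (h : ¬ HasRep st.toList) : modified_lcs_tabular_alt st = 0 := by
  unfold modified_lcs_tabular_alt
  dsimp only
  rw [if_neg (fun hc => h ((pvB_cond st).mp hc))]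


-- ===== VERDICT (by name: the statement is the Claim_ definition above) =====
theorem modified_lcs_tabular_spec : Claim_equal_modified_lcs_tabular := by
  intro st _
  unfold Spec_modified_lcs_tabular
  by_cases h : HasRep st.toList
  · rw [portA_one h, portB_one h]
  · rw [portA_zero h, portB_zero h]
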